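-- pv_equiv track=rewrite | github.com/jseongpark/grad_pro | RoBERTa_functions.py | get_categiry_to_name
-- ===== SOURCE A (Python) =====
-- def get_categiry_to_name(y_data):
--     category_to_id = {}
--     category_to_name = {}
--
--     for index, c in enumerate(y_data):
--         if c in category_to_id:
--             category_id = category_to_id[c]
--         else:
--             category_id = len(category_to_id)
--             category_to_id[c] = category_id
--             category_to_name[category_id] = c
--
--         y_data[index] = category_id
--     return category_to_name
-- ===== SOURCE B (Python) =====
-- def get_categiry_to_name(y_data):
--     # Backward overwrite pass: after it, first[c] is c's FIRST index in y_data.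
--     first = {}
--     for i, c in reversed(list(enumerate(y_data))):
--         first[c] = i
--     # The id order is the categories sorted by first-occurrence index.
--     order = sorted(first, key=first.get)
--     ids = {c: k for k, c in enumerate(order)}
--     for i in range(len(y_data)):
--         y_data[i] = ids[y_data[i]]
--     return dict(enumerate(order))
-- ===== Notes on version B (the rewrite author's own statement) =====
-- stated objective: alternative
-- what changed: Replaces A's fused forward loop that grows the id table incrementally (membership test + conditional double insert per element) with a different algorithm: a backward pass whose overwrites leave each category's first-occurrence index in a dict, followed by sorting the categories by that first index to obtain the id order; ids come from sorting positions, not from a running counter.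
import Mathlib
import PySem

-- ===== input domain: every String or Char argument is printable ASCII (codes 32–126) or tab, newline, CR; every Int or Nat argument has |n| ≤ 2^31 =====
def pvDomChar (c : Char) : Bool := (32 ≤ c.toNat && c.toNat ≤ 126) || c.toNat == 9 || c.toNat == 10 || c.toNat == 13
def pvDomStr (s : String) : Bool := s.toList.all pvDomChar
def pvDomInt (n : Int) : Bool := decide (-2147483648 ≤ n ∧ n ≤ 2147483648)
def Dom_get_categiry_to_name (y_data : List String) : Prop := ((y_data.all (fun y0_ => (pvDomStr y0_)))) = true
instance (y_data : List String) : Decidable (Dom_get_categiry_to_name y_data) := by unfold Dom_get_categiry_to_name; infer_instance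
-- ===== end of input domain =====

-- B replaces A's fused loop (incrementally growing id table, membership test + conditional double
-- insert per element) by a different algorithm: a backward overwrite pass records each category's
-- first index, then sorting the categories by first index yields the id order. Both Pythons mutate
-- y_data in place identically; the equivalence proved here is about the RETURN value (the
-- id→category dict), which the mutation does not affect.

-- ===== PORT A =====
-- A's loop, step for step, over y_data with the two dicts as state. The in-place write
-- y_data[index] = category_id changes the element type (str→int) and never feeds back into the
-- returned dict, so it is not carried in the pure state (see header line).
def get_categiry_to_name (y_data : List String) : List (Int × String) :=
  (y_data.foldl
    (fun (st : PySem.Dict String Int × PySem.Dict Int String) c =>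
      if st.1.contains c then st
      else
        let category_id : Int := (st.1.size : Int)
        (st.1.insert c category_id, st.2.insert category_id c))
    (PySem.Dict.empty, PySem.Dict.empty)).2.items

-- ===== PORT B =====
-- Source B: first[c] = i over reversed(list(enumerate(y_data))); order = sorted(first, key=first.get)
-- (every key is present in first, so first.get is its int value: ported as getD _ 0);
-- return dict(enumerate(order)). (the 'ids' dict and the index loop only realise the in-place
-- mutation of y_data, which does not affect the returned value — see header line.)
def get_categiry_to_name_alt (y_data : List String) : List (Int × String) :=
  let first : PySem.Dict String Int :=
    ((PySem.List.enumerate y_data 0).reverse).foldl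
      (fun d (p : Int × String) => d.insert p.2 p.1) PySem.Dict.empty
  let order : List String := PySem.List.sorted first.keys (fun c => first.getD c 0) false
  ((PySem.List.enumerate order 0).foldl
      (fun d (p : Int × String) => d.insert p.1 p.2) PySem.Dict.empty).items

-- ===== PRECONDITION & SPEC =====
def Spec_get_categiry_to_name (y_data : List String) (out : List (Int × String)) : Prop := out = get_categiry_to_name_alt y_data
instance (y_data : List String) (out : List (Int × String)) : Decidable (Spec_get_categiry_to_name y_data out) := by unfold Spec_get_categiry_to_name; infer_instance

-- ===== CLAIM (what is proved, stated in full; the proofs are below) =====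
def Claim_equal_get_categiry_to_name : Prop := ∀ (y_data : List String), Dom_get_categiry_to_name y_data → Spec_get_categiry_to_name y_data (get_categiry_to_name y_data)

-- ===== LEMMAS AND PROOFS =====

-- Loop invariant for A's fold: if ctid mirrors membership in the distinct-prefix s, ctid's size is
-- s.length, and ctn's items list s's enumeration, then after the remaining input y the returned
-- items are the enumeration of the distinct elements continued over y.
lemma get_categiry_to_name_inv (y : List String) :
    ∀ (s : List String) (d1 : PySem.Dict String Int) (d2 : PySem.Dict Int String),
    (∀ c, d1.contains c = PySem.Set.contains s c) →
    d1.size = s.length →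
    d2.items = PySem.List.enumerate s 0 →
    ((y.foldl
        (fun (st : PySem.Dict String Int × PySem.Dict Int String) c =>
          if st.1.contains c then st
          else
            let category_id : Int := (st.1.size : Int)
            (st.1.insert c category_id, st.2.insert category_id c))
        (d1, d2)).2).items
      = PySem.List.enumerate (y.foldl PySem.Set.add s) 0 := by
  induction y with
  | nil => intro s d1 d2 _ _ h2; simpa using h2
  | cons c y ih =>
    intro s d1 d2 h1 hsz h2
    by_cases hc : d1.contains c = true
    · have hs : PySem.Set.contains s c = true := by rw [← h1]; exact hc
      simp only [List.foldl_cons, hc, PySem.Set.add, hs]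
      exact ih s d1 d2 h1 hsz h2
    · have hc' : d1.contains c = false := by simpa using hc
      have hs : PySem.Set.contains s c = false := by rw [← h1]; exact hc'
      simp only [List.foldl_cons, hc', PySem.Set.add, hs, Bool.false_eq_true, if_false]
      -- the fresh key (s.length : Int) is not in d2
      have hfresh : d2.contains ((d1.size : Nat) : Int) = false := by
        rw [PySem.Dict.contains_eq_decide_mem_keys]
        simp only [PySem.Dict.keys, h2, PySem.List.map_fst_enumerate, hsz]
        simp [PySem.List.mem_pyRange_one]
      apply ih
      · intro c'
        rw [PySem.Dict.contains_insert]
        by_cases hcc : c' = c <;> simp [PySem.Set.contains, h1, hcc, or_comm]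
      · rw [PySem.Dict.size_insert, hc']
        simp [hsz]
      · rw [PySem.Dict.items_insert_of_not_contains _ _ hfresh, h2,
            PySem.List.enumerate_append]
        simp [PySem.List.enumerate, hsz]

-- backward fold over pairs: last write wins, so a lookup returns the FIRST pair with that key
lemma get?_reverse_foldl (xs : List (Int × String)) (c : String) :
    ((xs.reverse).foldl (fun d (p : Int × String) => d.insert p.2 p.1) PySem.Dict.empty).get? c
      = (xs.find? (fun p => p.2 == c)).map (·.1) := by
  induction xs with
  | nil => simp [PySem.Dict.get?_empty]
  | cons x t ih =>
    rw [List.reverse_cons, List.foldl_append]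
    simp only [List.foldl_cons, List.foldl_nil]
    rw [PySem.Dict.get?_insert]
    by_cases hx : x.2 = c
    · rw [if_pos hx.symm, List.find?_cons_of_pos (by simpa using hx)]
      rfl
    · rw [if_neg (fun h => hx h.symm), ih, List.find?_cons_of_neg (by simpa using hx)]

-- searching an enumeration for a value finds its first index
lemma find?_enumerate (y : List String) (c : String) :
    ∀ (s : Int),
    (PySem.List.enumerate y s).find? (fun p => p.2 == c)
      = (PySem.List.index? y c).map (fun k => (s + (k : Int), c)) := by
  induction y with
  | nil => intro s; simp [PySem.List.enumerate_nil, PySem.List.index?_eq_idxOf?]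
  | cons x t ih =>
    intro s
    rw [PySem.List.enumerate_cons]
    by_cases hx : x = c
    · subst hx
      rw [PySem.List.index?_cons_self, List.find?_cons_of_pos (by simp)]
      simp
    · have hb : (x == c) = false := by simpa using hx
      rw [PySem.List.index?_cons_of_ne t hx, List.find?_cons_of_neg (by simpa using hx)]
      rw [ih (s + 1)]
      cases hI : PySem.List.index? t c with
      | none => simp
      | some k =>
        simp only [Option.map_some]
        refine congrArg some ?_
        rw [Prod.ext_iff]
        constructor
        · push_cast; ring
        · rfl

-- first-occurrence indices are strictly increasing along the distinct elements in order
lemma idx_pairwise (y : List String) :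
    (PySem.Set.ofList y).Pairwise
      (fun a b => (PySem.List.index? y a).getD 0 < (PySem.List.index? y b).getD 0) := by
  induction y using List.reverseRecOn with
  | nil => simp [PySem.Set.ofList_nil]
  | append_singleton y c ih =>
    rw [PySem.Set.ofList_append_singleton]
    by_cases hc : c ∈ PySem.Set.ofList y
    · rw [PySem.Set.add_of_mem hc]
      refine ih.imp_of_mem ?_
      intro a b ha hb hab
      have ha' : a ∈ y := (PySem.Set.mem_ofList y a).mp ha
      have hb' : b ∈ y := (PySem.Set.mem_ofList y b).mp hb
      rw [PySem.List.index?_append_of_mem _ ha', PySem.List.index?_append_of_mem _ hb']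
      exact hab
    · rw [PySem.Set.add_of_not_mem hc]
      have hcy : c ∉ y := fun h => hc ((PySem.Set.mem_ofList y c).mpr h)
      rw [List.pairwise_append]
      refine ⟨ih.imp_of_mem ?_, by simp, ?_⟩
      · intro a b ha hb hab
        have ha' : a ∈ y := (PySem.Set.mem_ofList y a).mp ha
        have hb' : b ∈ y := (PySem.Set.mem_ofList y b).mp hb
        rw [PySem.List.index?_append_of_mem _ ha', PySem.List.index?_append_of_mem _ hb']
        exact hab
      · intro a ha b hb
        simp only [List.mem_singleton] at hb
        subst hb
        have ha' : a ∈ y := (PySem.Set.mem_ofList y a).mp ha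
        obtain ⟨k, hk⟩ := Option.isSome_iff_exists.mp
          ((PySem.List.index?_isSome_iff y a).mpr ha')
        obtain ⟨hklt, -, -⟩ := PySem.List.getElem_of_index?_eq_some hk
        rw [PySem.List.index?_append_of_mem _ ha',
            PySem.List.index?_append_singleton_self y b hcy, hk]
        simpa using hklt

-- distinct keys: the first components of an enumeration are pairwise distinct
lemma nodup_fst_enumerate (xs : List String) (s : Int) :
    ((PySem.List.enumerate xs s).map (fun p => p.1)).Nodup := by
  have h := PySem.List.pairwise_lt_enumerate (xs := xs) (s := s)
  have : ((PySem.List.enumerate xs s).map (fun p => p.1)).Pairwise (· < ·) :=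
    (List.pairwise_map).mpr h
  exact this.imp ne_of_lt

-- B's 'order' list is exactly the distinct elements in first-occurrence order
lemma order_eq_ofList (y : List String) :
    PySem.List.sorted
      (((PySem.List.enumerate y 0).reverse.foldl
          (fun d (p : Int × String) => d.insert p.2 p.1) PySem.Dict.empty).keys)
      (fun c =>
        ((PySem.List.enumerate y 0).reverse.foldl
          (fun d (p : Int × String) => d.insert p.2 p.1) PySem.Dict.empty).getD c 0)
      false
    = PySem.Set.ofList y := by
  have hget : ∀ c, ((PySem.List.enumerate y 0).reverse.foldl
      (fun d (p : Int × String) => d.insert p.2 p.1) PySem.Dict.empty).get? c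
      = (PySem.List.index? y c).map (fun k => (k : Int)) := by
    intro c
    rw [get?_reverse_foldl, find?_enumerate]
    simp [Function.comp]
  have hkeys : ((PySem.List.enumerate y 0).reverse.foldl
      (fun d (p : Int × String) => d.insert p.2 p.1) PySem.Dict.empty).keys
      = PySem.Set.ofList y.reverse := by
    rw [PySem.Dict.keys_foldl_insert_key]
    simp only [PySem.Dict.keys_empty, PySem.Set.update_nil_left, List.map_reverse,
      PySem.List.map_snd_enumerate]
  apply PySem.List.sorted_eq_of_perm_of_pairwise_lt
  · rw [hkeys]
    apply (List.perm_ext_iff_of_nodup (PySem.Set.nodup_ofList _) (PySem.Set.nodup_ofList _)).mpr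
    intro x
    rw [PySem.Set.mem_ofList, PySem.Set.mem_ofList, List.mem_reverse]
  · refine (idx_pairwise y).imp_of_mem ?_
    intro a b ha hb hab
    have ha' : a ∈ y := (PySem.Set.mem_ofList y a).mp ha
    have hb' : b ∈ y := (PySem.Set.mem_ofList y b).mp hb
    obtain ⟨ka, hka⟩ := Option.isSome_iff_exists.mp
      ((PySem.List.index?_isSome_iff y a).mpr ha')
    obtain ⟨kb, hkb⟩ := Option.isSome_iff_exists.mp
      ((PySem.List.index?_isSome_iff y b).mpr hb')
    rw [PySem.Dict.getD_eq_get?_getD, PySem.Dict.getD_eq_get?_getD, hget a, hget b,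
        hka, hkb]
    rw [hka, hkb] at hab
    simp only [Option.getD_some] at hab
    simp
    exact_mod_cast hab

-- ===== VERDICT (by name: the statement is the Claim_ definition above) =====
theorem get_categiry_to_name_spec : Claim_equal_get_categiry_to_name := by
  intro y _
  unfold Spec_get_categiry_to_name get_categiry_to_name get_categiry_to_name_alt
  rw [get_categiry_to_name_inv y [] PySem.Dict.empty PySem.Dict.empty
        (by intro c; simp [PySem.Set.contains]) (by simp) (by simp [PySem.List.enumerate, PySem.Dict.empty])]
  rw [PySem.Dict.items_foldl_insert_fresh _ _ _ _ (by intro a _; simp) (nodup_fst_enumerate _ _)]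
  rw [order_eq_ofList y]
  simp [PySem.Set.ofList_eq_foldl, PySem.Dict.empty]
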